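-- pv_equiv track=rewrite | github.com/drakiez13/CS112.L21.KHTN_N12 | TuLuyenTap/BreakingTheRecords/SourceCode.py | breakingRecords
-- ===== SOURCE A (Python) =====
-- def breakingRecords(scores):
--     num_min = 0
--     num_max = 0
--     _min = scores[0]
--     _max = scores[0]
--     for i in scores:
--         if i < _min:
--             num_min += 1
--             _min = i
--         elif i > _max:
--             num_max += 1
--             _max = i
--
--     return [num_max, num_min]
-- ===== SOURCE B (Python) =====
-- def breakingRecords(scores):
--     maxes = []
--     mins = []
--     for s in scores:
--         maxes.append(s if not maxes or s > maxes[-1] else maxes[-1])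
--         mins.append(s if not mins or s < mins[-1] else mins[-1])
--     num_max = sum(1 for prev, cur in zip(maxes, maxes[1:]) if cur > prev)
--     num_min = sum(1 for prev, cur in zip(mins, mins[1:]) if cur < prev)
--     return [num_max, num_min]
-- ===== Notes on version B (the rewrite author's own statement) =====
-- stated objective: alternative
-- what changed: Replaces A's fused single scan maintaining scalar record variables and counters by a build-then-count decomposition: first materialise the running-maximum and running-minimum prefix tables, then count strict steps between adjacent table entries in a separate pass.
import Mathlib
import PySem

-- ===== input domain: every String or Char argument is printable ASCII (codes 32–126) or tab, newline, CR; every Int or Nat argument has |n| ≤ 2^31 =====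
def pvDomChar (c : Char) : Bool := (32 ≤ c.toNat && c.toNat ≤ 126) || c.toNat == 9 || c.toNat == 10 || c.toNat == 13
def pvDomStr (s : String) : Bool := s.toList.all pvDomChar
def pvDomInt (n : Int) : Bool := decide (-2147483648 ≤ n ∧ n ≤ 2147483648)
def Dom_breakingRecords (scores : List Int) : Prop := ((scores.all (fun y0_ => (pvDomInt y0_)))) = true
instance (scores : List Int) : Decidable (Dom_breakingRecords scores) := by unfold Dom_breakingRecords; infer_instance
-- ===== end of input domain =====

-- B builds the running-max/running-min prefix tables first, then counts strict steps
-- between adjacent entries in a separate pass (A fuses everything into one scalar scan).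

-- ===== PORT A =====
-- A's loop body as a named helper (transliteration of the if/elif body)
def pvStepA (st : Int × Int × Int × Int) (i : Int) : Int × Int × Int × Int :=
  let (num_min, num_max, mn, mx) := st
  if i < mn then (num_min + 1, num_max, i, mx)
  else if i > mx then (num_min, num_max + 1, mn, i)
  else st

-- A's single loop over scores with state (num_min, num_max, _min, _max); indexing the first element
-- raises IndexError on the empty list, which Pre_ excludes (the [] branch is unreachable).
def breakingRecords (scores : List Int) : List Int :=
  match scores with
  | [] => []
  | s0 :: _ =>
    let st := scores.foldl pvStepA (0, 0, s0, s0)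
    [st.2.1, st.1]

-- ===== PORT B =====
-- Source B's loop appending to both prefix tables at once.
def pvStepB (acc : List Int × List Int) (s : Int) : List Int × List Int :=
  (acc.1 ++ [match acc.1.getLast? with | none => s | some m => if s > m then s else m],
   acc.2 ++ [match acc.2.getLast? with | none => s | some m => if s < m then s else m])

def breakingRecords_alt (scores : List Int) : List Int :=
  let p := scores.foldl pvStepB ([], [])
  let maxes := p.1
  let mins := p.2
  let num_max := ((maxes.zip (maxes.drop 1)).countP (fun q => decide (q.2 > q.1)) : Nat)
  let num_min := ((mins.zip (mins.drop 1)).countP (fun q => decide (q.2 < q.1)) : Nat)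
  [(num_max : Int), (num_min : Int)]

-- ===== PRECONDITION & SPEC =====
-- Pre_ excludes exactly the empty list, on which A raises IndexError indexing the first element.
def Pre_breakingRecords (scores : List Int) : Prop := scores ≠ []
instance (scores : List Int) : Decidable (Pre_breakingRecords scores) := by unfold Pre_breakingRecords; infer_instance
def pvWitness_breakingRecords : List Int := [3, 1, 4, 1, 5]

def Spec_breakingRecords (scores : List Int) (out : List Int) : Prop := out = breakingRecords_alt scores
instance (scores : List Int) (out : List Int) : Decidable (Spec_breakingRecords scores out) := by unfold Spec_breakingRecords; infer_instance

-- ===== CLAIM (what is proved, stated in full; the proofs are below) =====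
def Claim_equal_breakingRecords : Prop := ∀ (scores : List Int), Dom_breakingRecords scores → Pre_breakingRecords scores → Spec_breakingRecords scores (breakingRecords scores)

-- ===== LEMMAS AND PROOFS =====

-- record counters as plain recursive functions: number of strict new maxima / minima
def cInc (mx : Int) : List Int → Int
  | [] => 0
  | i :: r => if i > mx then 1 + cInc i r else cInc mx r

def cDec (mn : Int) : List Int → Int
  | [] => 0
  | i :: r => if i < mn then 1 + cDec i r else cDec mn r

-- the running-maximum / running-minimum tables Source B materialises
def runMax (mx : Int) : List Int → List Int
  | [] => []
  | i :: r => (if i > mx then i else mx) :: runMax (if i > mx then i else mx) r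

def runMin (mn : Int) : List Int → List Int
  | [] => []
  | i :: r => (if i < mn then i else mn) :: runMin (if i < mn then i else mn) r

-- A's fold computes the two record counters (needs mn ≤ mx for the elif to be harmless)
theorem foldA_eq (rest : List Int) : ∀ (num_min num_max mn mx : Int), mn ≤ mx →
    (rest.foldl pvStepA (num_min, num_max, mn, mx)).1 = num_min + cDec mn rest ∧
    (rest.foldl pvStepA (num_min, num_max, mn, mx)).2.1 = num_max + cInc mx rest := by
  induction rest with
  | nil => intro _ _ _ _ _; simp [cDec, cInc]
  | cons i r ih =>
    intro num_min num_max mn mx hle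
    simp only [List.foldl_cons, cDec, cInc, pvStepA]
    by_cases h1 : i < mn
    · have h2 : ¬ i > mx := by omega
      simp only [if_pos h1, if_neg h2]
      have := ih (num_min + 1) num_max i mx (by omega)
      constructor
      · rw [this.1]; ring
      · rw [this.2]
    · by_cases h2 : i > mx
      · simp only [if_neg h1, if_pos h2]
        have := ih num_min (num_max + 1) mn i (by omega)
        constructor
        · rw [this.1]
        · rw [this.2]; ring
      · simp only [if_neg h1, if_neg h2]
        exact ih num_min num_max mn mx hle

-- Source B's single loop builds exactly the two prefix tables
theorem foldB_eq (rest : List Int) : ∀ (am bm : List Int) (mx mn : Int),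
    am.getLast? = some mx → bm.getLast? = some mn →
    rest.foldl pvStepB (am, bm) = (am ++ runMax mx rest, bm ++ runMin mn rest) := by
  induction rest with
  | nil => intro am bm mx mn _ _; simp [runMax, runMin]
  | cons i r ih =>
    intro am bm mx mn hA hB
    simp only [List.foldl_cons, pvStepB, hA, hB, runMax, runMin]
    rw [ih (am ++ [if i > mx then i else mx]) (bm ++ [if i < mn then i else mn])
        (if i > mx then i else mx) (if i < mn then i else mn)
        (by simp) (by simp)]
    simp

-- counting adjacent pairs in a chain headed by y
def cntAdjGT (y : Int) : List Int → Nat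
  | [] => 0
  | x :: r => (if x > y then 1 else 0) + cntAdjGT x r

def cntAdjLT (y : Int) : List Int → Nat
  | [] => 0
  | x :: r => (if x < y then 1 else 0) + cntAdjLT x r

theorem zip_countP_gt (l : List Int) : ∀ (y : Int),
    ((y :: l).zip l).countP (fun q => decide (q.2 > q.1)) = cntAdjGT y l := by
  induction l with
  | nil => intro y; simp [cntAdjGT]
  | cons x r ih =>
    intro y
    simp only [List.zip_cons_cons, List.countP_cons, cntAdjGT, ih x]
    by_cases h : x > y <;> simp [h] <;> omega

theorem zip_countP_lt (l : List Int) : ∀ (y : Int),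
    ((y :: l).zip l).countP (fun q => decide (q.2 < q.1)) = cntAdjLT y l := by
  induction l with
  | nil => intro y; simp [cntAdjLT]
  | cons x r ih =>
    intro y
    simp only [List.zip_cons_cons, List.countP_cons, cntAdjLT, ih x]
    by_cases h : x < y <;> simp [h] <;> omega

-- the adjacent-step count over the running-max table equals the record counter
theorem cntAdj_runMax (l : List Int) : ∀ (mx : Int),
    (cntAdjGT mx (runMax mx l) : Int) = cInc mx l := by
  induction l with
  | nil => intro mx; simp [runMax, cntAdjGT, cInc]
  | cons i r ih =>
    intro mx
    by_cases h : i > mx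
    · simp only [runMax, if_pos h, cntAdjGT, cInc]
      push_cast [ih i]
      simp [h]
    · simp only [runMax, if_neg h, cntAdjGT, cInc]
      have h2 : ¬ mx > mx := by omega
      push_cast [ih mx]
      simp [h2]

theorem cntAdj_runMin (l : List Int) : ∀ (mn : Int),
    (cntAdjLT mn (runMin mn l) : Int) = cDec mn l := by
  induction l with
  | nil => intro mn; simp [runMin, cntAdjLT, cDec]
  | cons i r ih =>
    intro mn
    by_cases h : i < mn
    · simp only [runMin, if_pos h, cntAdjLT, cDec]
      push_cast [ih i]
      simp [h]
    · simp only [runMin, if_neg h, cntAdjLT, cDec]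
      have h2 : ¬ mn < mn := by omega
      push_cast [ih mn]
      simp [h2]

-- ===== VERDICT (by name: the statement is the Claim_ definition above) =====
theorem breakingRecords_spec : Claim_equal_breakingRecords := by
  intro scores _ hpre
  unfold Spec_breakingRecords
  match scores, hpre with
  | s0 :: rest, _ =>
    unfold breakingRecords breakingRecords_alt
    simp only [List.foldl_cons, List.nil_append]
    -- A: first iteration leaves the state unchanged
    have hstep : pvStepA (0, 0, s0, s0) s0 = (0, 0, s0, s0) := by
      simp [pvStepA]
    have hstepB : pvStepB ([], []) s0 = ([s0], [s0]) := by
      simp [pvStepB]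
    rw [hstep, hstepB]
    have hA := foldA_eq rest 0 0 s0 s0 le_rfl
    have hB := foldB_eq rest [s0] [s0] s0 s0 (by simp) (by simp)
    rw [hB]
    simp only [List.cons_append, List.nil_append, List.drop_succ_cons, List.drop_zero]
    rw [zip_countP_gt, zip_countP_lt]
    rw [hA.1, hA.2, List.cons_eq_cons]
    constructor
    · rw [cntAdj_runMax]; ring
    · simp only [List.cons_eq_cons, and_true]
      rw [cntAdj_runMin]; ring
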